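-- pv_equiv track=rewrite | github.com/SachinSSh/docPar | DSA/sliding_window.py | sliding_window_fixed
-- ===== SOURCE A (Python) =====
-- def sliding_window_fixed(arr, k):
--     # k is the window size
--     n = len(arr)
--     result = []
--
--     # Calculate sum of first window
--     window_sum = sum(arr[:k])
--     result.append(window_sum)
--
--     # Slide window and calculate sums
--     for i in range(n - k):
--         window_sum = window_sum - arr[i] + arr[i + k]
--         result.append(window_sum)
--
--     return result
-- ===== SOURCE B (Python) =====
-- def sliding_window_fixed(arr, k):
--     # prefix-sum table, then window sums as differences (window size capped at n)
--     n = len(arr)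
--     pre = [0]
--     for x in arr:
--         pre.append(pre[-1] + x)
--     m = min(k, n)
--     return [pre[i + m] - pre[i] for i in range(n - m + 1)]
-- ===== Notes on version B (the rewrite author's own statement) =====
-- stated objective: alternative
-- what changed: Replaces A's incremental running-window update (seed sum, then subtract/add per slide) with a prefix-sum table built once and each window sum emitted as a difference pre[i+m]-pre[i] with the window capped at len(arr).
import Mathlib
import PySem

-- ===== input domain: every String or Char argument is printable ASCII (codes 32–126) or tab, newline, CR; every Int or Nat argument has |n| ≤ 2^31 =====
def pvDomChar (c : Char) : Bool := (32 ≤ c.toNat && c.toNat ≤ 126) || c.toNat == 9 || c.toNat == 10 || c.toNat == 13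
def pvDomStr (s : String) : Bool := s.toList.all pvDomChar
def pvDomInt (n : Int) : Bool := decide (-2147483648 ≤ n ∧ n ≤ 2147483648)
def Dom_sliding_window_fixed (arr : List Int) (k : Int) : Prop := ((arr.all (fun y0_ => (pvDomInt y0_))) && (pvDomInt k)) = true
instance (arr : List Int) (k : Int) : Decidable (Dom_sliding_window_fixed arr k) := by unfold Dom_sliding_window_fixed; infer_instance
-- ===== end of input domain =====

-- B computes the window sums from a prefix-sum table (differences pre[i+m]-pre[i], window capped
-- at n) instead of A's incremental running-sum slide; same cost, different decomposition.

-- ===== PORT A =====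
def sliding_window_fixed (arr : List Int) (k : Int) : List Int :=
  let n : Int := arr.length
  let windowSum : Int := (PySem.List.slice arr none (some k)).sum
  ((PySem.List.pyRange 0 (n - k) 1).foldl
    (fun (st : List Int × Int) i =>
      let ws := st.2 - PySem.List.pyGetD arr i 0 + PySem.List.pyGetD arr (i + k) 0
      (st.1 ++ [ws], ws)) ([windowSum], windowSum)).1

-- ===== PORT B =====
def sliding_window_fixed_alt (arr : List Int) (k : Int) : List Int :=
  let n : Int := arr.length
  let pre : List Int := arr.foldl (fun pre x => pre ++ [PySem.List.pyGetD pre (-1) 0 + x]) [0]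
  let m : Int := min k n
  (PySem.List.pyRange 0 (n - m + 1) 1).map
    (fun i => PySem.List.pyGetD pre (i + m) 0 - PySem.List.pyGetD pre i 0)

-- ===== PRECONDITION & SPEC =====
-- Pre_ excludes exactly the inputs where A raises IndexError: every negative k (the slide loop
-- runs past the end of arr).
def Pre_sliding_window_fixed (arr : List Int) (k : Int) : Prop := 0 ≤ k
instance (arr : List Int) (k : Int) : Decidable (Pre_sliding_window_fixed arr k) := by
  unfold Pre_sliding_window_fixed; infer_instance
def pvWitness_sliding_window_fixed : List Int × Int := ([1, 2, 3], 2)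

def Spec_sliding_window_fixed (arr : List Int) (k : Int) (out : List Int) : Prop := out = sliding_window_fixed_alt arr k
instance (arr : List Int) (k : Int) (out : List Int) : Decidable (Spec_sliding_window_fixed arr k out) := by unfold Spec_sliding_window_fixed; infer_instance

-- ===== CLAIM (what is proved, stated in full; the proofs are below) =====
def Claim_equal_sliding_window_fixed : Prop := ∀ (arr : List Int) (k : Int), Dom_sliding_window_fixed arr k → Pre_sliding_window_fixed arr k → Spec_sliding_window_fixed arr k (sliding_window_fixed arr k)

-- ===== LEMMAS AND PROOFS =====

/-- Sum of the first `j` elements (the value `pre[j]` holds in B). -/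
def psum (arr : List Int) (j : Nat) : Int := (arr.take j).sum

theorem psum_succ (arr : List Int) (j : Nat) (h : j < arr.length) :
    psum arr (j + 1) = psum arr j + arr.getD j 0 := by
  simp only [psum, List.take_succ, List.sum_append, List.getElem?_eq_getElem h,
    Option.toList_some, List.sum_cons, List.sum_nil, List.getD_eq_getElem?_getD, Option.getD_some]
  ring

theorem psum_length (arr : List Int) : psum arr arr.length = arr.sum := by
  simp [psum]

/-- B's prefix-building fold appends the running sums of the tail after any nonempty accumulator. -/
theorem build_pre (arr : List Int) (p : List Int) (c : Int) :
    arr.foldl (fun pre x => pre ++ [PySem.List.pyGetD pre (-1) 0 + x]) (p ++ [c]) =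
      (p ++ [c]) ++ (List.range arr.length).map (fun j => c + psum arr (j + 1)) := by
  induction arr generalizing p c with
  | nil => simp
  | cons x xs ih =>
    simp only [List.foldl_cons, PySem.List.pyGetD_neg_one_append_singleton]
    rw [ih (p ++ [c]) (c + x)]
    simp [List.range_succ_eq_map, List.map_map, Function.comp, psum, add_assoc]

/-- `pre[j] = psum arr j` for `j ≤ n`. -/
theorem pre_getD (arr : List Int) (j : Nat) (h : j ≤ arr.length) :
    (arr.foldl (fun pre x => pre ++ [PySem.List.pyGetD pre (-1) 0 + x]) [0]).getD j 0 =
      psum arr j := by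
  have := build_pre arr [] 0
  simp only [List.nil_append] at this
  rw [this]
  cases j with
  | zero => simp [psum]
  | succ j =>
    have hj : j < arr.length := by omega
    rw [List.getD_eq_getElem?_getD]
    simp [List.getElem?_append, List.getElem?_map, List.getElem?_range hj]

/-- Invariant of A's sliding loop. -/
theorem loopA (arr : List Int) (kk : Nat) (c : Nat) :
    ∀ (j : Nat) (acc : List Int), j + c + kk ≤ arr.length →
    (PySem.List.pyRange (j : Int) ((j : Int) + (c : Int)) 1).foldl
      (fun (st : List Int × Int) i =>
        let ws := st.2 - PySem.List.pyGetD arr i 0 + PySem.List.pyGetD arr (i + (kk : Int)) 0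
        (st.1 ++ [ws], ws))
      (acc, psum arr (j + kk) - psum arr j) =
      (acc ++ (List.range c).map (fun t => psum arr (j + 1 + t + kk) - psum arr (j + 1 + t)),
        psum arr (j + c + kk) - psum arr (j + c)) := by
  induction c with
  | zero =>
    intro j acc _
    rw [PySem.List.pyRange_one_eq_nil (by omega)]
    simp
  | succ c ih =>
    intro j acc hle
    rw [show ((j : Int) + ((c : Nat) + 1 : Nat) : Int) = ((j + 1 : Nat) : Int) + (c : Int) by push_cast; ring]
    rw [PySem.List.pyRange_one_cons (by push_cast; omega)]
    simp only [List.foldl_cons]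
    have hget1 : PySem.List.pyGetD arr (j : Int) 0 = arr[j]?.getD 0 := by
      rw [PySem.List.pyGetD_natCast, List.getD_eq_getElem?_getD]
    have hget2 : PySem.List.pyGetD arr ((j : Int) + (kk : Int)) 0 = arr[j + kk]?.getD 0 := by
      rw [show ((j : Int) + (kk : Int)) = ((j + kk : Nat) : Int) by push_cast; ring,
        PySem.List.pyGetD_natCast, List.getD_eq_getElem?_getD]
    have hstep : psum arr (j + kk) - psum arr j - arr[j]?.getD 0 + arr[j + kk]?.getD 0 =
        psum arr (j + 1 + kk) - psum arr (j + 1) := by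
      have h1 := psum_succ arr j (by omega)
      have h2 := psum_succ arr (j + kk) (by omega)
      rw [List.getD_eq_getElem?_getD] at h1 h2
      rw [show j + 1 + kk = (j + kk) + 1 by ring, h2, h1]
      ring
    rw [hget1, hget2]
    simp only [hstep]
    rw [show ((j : Int) + 1) = ((j + 1 : Nat) : Int) by push_cast; ring]
    rw [ih (j + 1) (acc ++ [psum arr (j + 1 + kk) - psum arr (j + 1)]) (by omega)]
    rw [Prod.mk.injEq]
    refine ⟨?_, ?_⟩
    · rw [List.append_assoc, List.range_succ_eq_map]
      simp only [List.map_cons, List.map_map, List.cons_append, List.nil_append, Function.comp]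
      rw [show j + 1 + 0 + kk = j + 1 + kk by omega, show j + 1 + 0 = j + 1 by omega]
      refine congrArg (fun l => acc ++ l) (congrArg (List.cons _) (List.map_congr_left ?_))
      intro t _
      simp only [Function.comp_apply, Nat.succ_eq_add_one]
      rw [show j + 1 + 1 + t + kk = j + 1 + (t + 1) + kk by omega,
        show j + 1 + 1 + t = j + 1 + (t + 1) by omega]
    · rw [show j + 1 + c + kk = j + (c + 1) + kk by omega,
        show j + 1 + c = j + (c + 1) by omega]

/-- `pre[j]` (B's table) is the `j`-th prefix sum, in `pyGetD` form. -/
theorem pre_lookup (arr : List Int) (j : Nat) (h : j ≤ arr.length) :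
    PySem.List.pyGetD (arr.foldl (fun pre x => pre ++ [PySem.List.pyGetD pre (-1) 0 + x]) [0])
      ((j : Nat) : Int) 0 = psum arr j := by
  rw [PySem.List.pyGetD_natCast]; exact pre_getD arr j h

-- ===== VERDICT (by name: the statement is the Claim_ definition above) =====
theorem sliding_window_fixed_spec : Claim_equal_sliding_window_fixed := by
  intro arr k _ hk
  unfold Pre_sliding_window_fixed at hk
  unfold Spec_sliding_window_fixed
  obtain ⟨kk, rfl⟩ : ∃ kk : Nat, k = (kk : Int) := ⟨k.toNat, (Int.toNat_of_nonneg hk).symm⟩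
  simp only [sliding_window_fixed, sliding_window_fixed_alt]
  have h0 : psum arr 0 = 0 := rfl
  by_cases hle : kk ≤ arr.length
  · -- the window fits: both sides are the list of all n-kk+1 window sums
    have hsl : (PySem.List.slice arr none (some ((kk : Nat) : Int))).sum = psum arr kk := by
      rw [PySem.List.slice_to_natCast]; rfl
    have hloop := loopA arr kk (arr.length - kk) 0 [psum arr kk] (by omega)
    simp only [Nat.cast_zero, zero_add, Nat.zero_add, Nat.cast_sub hle, h0, sub_zero] at hloop
    rw [hsl, hloop]
    have hmin : min ((kk : Nat) : Int) ((arr.length : Nat) : Int) = ((kk : Nat) : Int) := by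
      rw [min_eq_left]; exact_mod_cast hle
    rw [hmin, show ((arr.length : Int) - (kk : Int) + 1) = ((arr.length - kk + 1 : Nat) : Int) by
      push_cast [hle]; ring, PySem.List.pyRange_zero_nat, List.map_map]
    have hmap : (List.range (arr.length - kk + 1)).map
        ((fun i => PySem.List.pyGetD (arr.foldl (fun pre x =>
            pre ++ [PySem.List.pyGetD pre (-1) 0 + x]) [0]) (i + ((kk : Nat) : Int)) 0 -
          PySem.List.pyGetD (arr.foldl (fun pre x =>
            pre ++ [PySem.List.pyGetD pre (-1) 0 + x]) [0]) i 0) ∘ (fun t : Nat => (t : Int))) =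
        (List.range (arr.length - kk + 1)).map (fun t => psum arr (t + kk) - psum arr t) := by
      apply List.map_congr_left
      intro t ht
      rw [List.mem_range] at ht
      simp only [Function.comp_apply]
      rw [show ((t : Int) + ((kk : Nat) : Int)) = (((t + kk : Nat)) : Int) by push_cast; ring,
        pre_lookup arr (t + kk) (by omega), pre_lookup arr t (by omega)]
    rw [hmap, List.range_succ_eq_map, List.map_cons, List.map_map]
    simp only [Nat.zero_add, h0, sub_zero]
    refine congrArg (List.cons _) (List.map_congr_left ?_)
    intro t _
    simp only [Function.comp_apply, Nat.succ_eq_add_one]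
    rw [show 1 + t + kk = t + 1 + kk by omega, show 1 + t = t + 1 by omega]
  · -- the window is larger than the array: both sides are [sum arr]
    push_neg at hle
    have hsl : (PySem.List.slice arr none (some ((kk : Nat) : Int))).sum = arr.sum := by
      rw [PySem.List.slice_to_natCast, List.take_of_length_le (by omega)]
    have hempty : PySem.List.pyRange 0 ((arr.length : Int) - ((kk : Nat) : Int)) 1 = [] :=
      PySem.List.pyRange_one_eq_nil (by push_cast; omega)
    rw [hsl, hempty, List.foldl_nil]
    have hmin : min ((kk : Nat) : Int) ((arr.length : Nat) : Int) = ((arr.length : Nat) : Int) := by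
      rw [min_eq_right]; exact_mod_cast hle.le
    rw [hmin, show ((arr.length : Int) - (arr.length : Int) + 1) = (0 : Int) + 1 by ring,
      PySem.List.pyRange_one_singleton, List.map_singleton]
    rw [show ((0 : Int) + (arr.length : Int)) = ((arr.length : Nat) : Int) by ring,
      pre_lookup arr arr.length le_rfl, PySem.List.pyGetD_zero,
      pre_getD arr 0 (by omega), psum_length, h0, sub_zero]
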